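-- pv_equiv track=rewrite | github.com/Dee66/repo-scanner | src/core/pipeline/governance_signal_analysis.py | identify_governance_gaps
-- ===== SOURCE A (Python) =====
-- from typing import Dict, List, Set
--
-- def identify_governance_gaps(file_list: List[str], structure: Dict) -> List[Dict]:
--     """Identify governance gaps and improvement opportunities."""
--     gaps = []
--
--     # Check for missing CI/CD
--     has_ci = any(".github/workflows" in f or ".gitlab-ci" in f or "Jenkinsfile" in f for f in file_list)
--     if not has_ci:
--         gaps.append({
--             "gap_type": "missing_ci_cd",
--             "description": "No CI/CD pipeline detected",
--             "severity": "high",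
--             "recommendation": "Implement automated testing and deployment pipelines"
--         })
--
--     # Check for missing code quality tools
--     quality_tools = ["pylint", "flake8", "black", "pre-commit"]
--     has_quality = any(any(tool in f.lower() for f in file_list) for tool in quality_tools)
--     if not has_quality:
--         gaps.append({
--             "gap_type": "missing_code_quality",
--             "description": "No automated code quality tools detected",
--             "severity": "medium",
--             "recommendation": "Add linters, formatters, and pre-commit hooks"
--         })
--
--     # Check for missing security practices
--     security_indicators = ["SECURITY.md", "dependabot", "bandit"]
--     has_security = any(any(indicator.lower() in f.lower() for f in file_list) for indicator in security_indicators)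
--     if not has_security:
--         gaps.append({
--             "gap_type": "missing_security_practices",
--             "description": "Limited security governance detected",
--             "severity": "high",
--             "recommendation": "Add security scanning, dependency updates, and security policy"
--         })
--
--     # Check for incomplete documentation
--     required_docs = ["README", "LICENSE"]
--     missing_docs = [doc for doc in required_docs if not any(doc in f.upper() for f in file_list)]
--     if missing_docs:
--         gaps.append({
--             "gap_type": "incomplete_documentation",
--             "description": f"Missing documentation: {', '.join(missing_docs)}",
--             "severity": "medium",
--             "recommendation": "Add comprehensive documentation and legal files"
--         })
--
--     return gaps
-- ===== SOURCE B (Python) =====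
-- from typing import Dict, List
--
-- def identify_governance_gaps(file_list: List[str], structure: Dict) -> List[Dict]:
--     """Identify governance gaps in a single pass over file_list."""
--     quality_tools = ["pylint", "flake8", "black", "pre-commit"]
--     security_indicators_lower = ["security.md", "dependabot", "bandit"]
--     required_docs = ["README", "LICENSE"]
--     has_ci = has_quality = has_security = False
--     seen_docs = set()
--     for f in file_list:
--         fl = f.lower()
--         fu = f.upper()
--         if ".github/workflows" in f or ".gitlab-ci" in f or "Jenkinsfile" in f:
--             has_ci = True
--         if any(tool in fl for tool in quality_tools):
--             has_quality = True
--         if any(ind in fl for ind in security_indicators_lower):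
--             has_security = True
--         for doc in required_docs:
--             if doc in fu:
--                 seen_docs.add(doc)
--     gaps = []
--     if not has_ci:
--         gaps.append({
--             "gap_type": "missing_ci_cd",
--             "description": "No CI/CD pipeline detected",
--             "severity": "high",
--             "recommendation": "Implement automated testing and deployment pipelines"
--         })
--     if not has_quality:
--         gaps.append({
--             "gap_type": "missing_code_quality",
--             "description": "No automated code quality tools detected",
--             "severity": "medium",
--             "recommendation": "Add linters, formatters, and pre-commit hooks"
--         })
--     if not has_security:
--         gaps.append({
--             "gap_type": "missing_security_practices",
--             "description": "Limited security governance detected",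
--             "severity": "high",
--             "recommendation": "Add security scanning, dependency updates, and security policy"
--         })
--     missing_docs = [doc for doc in required_docs if doc not in seen_docs]
--     if missing_docs:
--         gaps.append({
--             "gap_type": "incomplete_documentation",
--             "description": f"Missing documentation: {', '.join(missing_docs)}",
--             "severity": "medium",
--             "recommendation": "Add comprehensive documentation and legal files"
--         })
--     return gaps
-- ===== Notes on version B (the rewrite author's own statement) =====
-- stated objective: alternative
-- what changed: A scans file_list separately for each of the four checks (with nested any-loops per tool/indicator/doc); B makes a single pass over file_list maintaining three boolean accumulators and a set of seen required docs, then assembles the same gap records.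
import Mathlib
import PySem

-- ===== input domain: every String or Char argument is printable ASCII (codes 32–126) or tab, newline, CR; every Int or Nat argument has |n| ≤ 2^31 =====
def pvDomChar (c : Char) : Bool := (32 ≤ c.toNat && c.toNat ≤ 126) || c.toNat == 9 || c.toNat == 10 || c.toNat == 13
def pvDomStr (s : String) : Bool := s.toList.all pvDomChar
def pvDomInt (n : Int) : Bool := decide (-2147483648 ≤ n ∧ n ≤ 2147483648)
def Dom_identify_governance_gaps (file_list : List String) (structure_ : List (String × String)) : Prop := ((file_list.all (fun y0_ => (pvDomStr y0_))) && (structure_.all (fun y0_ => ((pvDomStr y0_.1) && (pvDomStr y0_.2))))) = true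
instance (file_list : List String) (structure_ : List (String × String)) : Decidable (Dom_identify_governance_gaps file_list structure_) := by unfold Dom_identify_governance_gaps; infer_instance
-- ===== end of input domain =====

-- B replaces A's four separate scans of file_list by one pass with boolean accumulators and a
-- seen-docs set (objective: alternative decomposition, same output).

-- shared output literals (the gap records both programs append)
def gapCI : List (String × String) :=
  [("gap_type", "missing_ci_cd"),
   ("description", "No CI/CD pipeline detected"),
   ("severity", "high"),
   ("recommendation", "Implement automated testing and deployment pipelines")]
def gapQuality : List (String × String) :=
  [("gap_type", "missing_code_quality"),
   ("description", "No automated code quality tools detected"),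
   ("severity", "medium"),
   ("recommendation", "Add linters, formatters, and pre-commit hooks")]
def gapSecurity : List (String × String) :=
  [("gap_type", "missing_security_practices"),
   ("description", "Limited security governance detected"),
   ("severity", "high"),
   ("recommendation", "Add security scanning, dependency updates, and security policy")]
def gapDocs (missing_docs : List String) : List (String × String) :=
  [("gap_type", "incomplete_documentation"),
   ("description", "Missing documentation: " ++ PySem.Str.join ", " missing_docs),
   ("severity", "medium"),
   ("recommendation", "Add comprehensive documentation and legal files")]

-- ===== PORT A =====
def identify_governance_gaps (file_list : List String) (structure_ : List (String × String)) : List (List (String × String)) :=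
  let gaps : List (List (String × String)) := []
  let has_ci := file_list.any (fun f =>
    PySem.Str.isIn ".github/workflows" f || PySem.Str.isIn ".gitlab-ci" f || PySem.Str.isIn "Jenkinsfile" f)
  let gaps := if !has_ci then gaps ++ [gapCI] else gaps
  let quality_tools := ["pylint", "flake8", "black", "pre-commit"]
  let has_quality := quality_tools.any (fun tool =>
    file_list.any (fun f => PySem.Str.isIn tool (PySem.Str.lower f)))
  let gaps := if !has_quality then gaps ++ [gapQuality] else gaps
  let security_indicators := ["SECURITY.md", "dependabot", "bandit"]
  let has_security := security_indicators.any (fun ind =>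
    file_list.any (fun f => PySem.Str.isIn (PySem.Str.lower ind) (PySem.Str.lower f)))
  let gaps := if !has_security then gaps ++ [gapSecurity] else gaps
  let required_docs := ["README", "LICENSE"]
  let missing_docs := required_docs.filter (fun doc =>
    !(file_list.any (fun f => PySem.Str.isIn doc (PySem.Str.upper f))))
  let gaps := if !missing_docs.isEmpty then gaps ++ [gapDocs missing_docs] else gaps
  gaps

-- ===== PORT B =====
-- loop body of B's single pass: state = (has_ci, has_quality, has_security, seen_docs)
def pvStepB (st : Bool × Bool × Bool × List String) (f : String) : Bool × Bool × Bool × List String :=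
  let fl := PySem.Str.lower f
  let fu := PySem.Str.upper f
  ⟨(if PySem.Str.isIn ".github/workflows" f || PySem.Str.isIn ".gitlab-ci" f || PySem.Str.isIn "Jenkinsfile" f
      then true else st.1),
   (if ["pylint", "flake8", "black", "pre-commit"].any (fun tool => PySem.Str.isIn tool fl)
      then true else st.2.1),
   (if ["security.md", "dependabot", "bandit"].any (fun ind => PySem.Str.isIn ind fl)
      then true else st.2.2.1),
   ["README", "LICENSE"].foldl (fun s doc => if PySem.Str.isIn doc fu then PySem.Set.add s doc else s) st.2.2.2⟩

def identify_governance_gaps_alt (file_list : List String) (structure_ : List (String × String)) : List (List (String × String)) :=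
  let st := file_list.foldl pvStepB (false, false, false, PySem.Set.empty)
  let gaps : List (List (String × String)) := []
  let gaps := if !st.1 then gaps ++ [gapCI] else gaps
  let gaps := if !st.2.1 then gaps ++ [gapQuality] else gaps
  let gaps := if !st.2.2.1 then gaps ++ [gapSecurity] else gaps
  let missing_docs := ["README", "LICENSE"].filter (fun doc => !(PySem.Set.contains st.2.2.2 doc))
  let gaps := if !missing_docs.isEmpty then gaps ++ [gapDocs missing_docs] else gaps
  gaps

-- ===== PRECONDITION & SPEC =====
def Spec_identify_governance_gaps (file_list : List String) (structure_ : List (String × String)) (out : List (List (String × String))) : Prop := out = identify_governance_gaps_alt file_list structure_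
instance (file_list : List String) (structure_ : List (String × String)) (out : List (List (String × String))) : Decidable (Spec_identify_governance_gaps file_list structure_ out) := by unfold Spec_identify_governance_gaps; infer_instance

-- ===== CLAIM (what is proved, stated in full; the proofs are below) =====
def Claim_equal_identify_governance_gaps : Prop := ∀ (file_list : List String) (structure_ : List (String × String)), Dom_identify_governance_gaps file_list structure_ → Spec_identify_governance_gaps file_list structure_ (identify_governance_gaps file_list structure_)

-- ===== LEMMAS AND PROOFS =====
def pciA (f : String) : Bool :=
  PySem.Str.isIn ".github/workflows" f || PySem.Str.isIn ".gitlab-ci" f || PySem.Str.isIn "Jenkinsfile" f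
def pqB (f : String) : Bool := ["pylint", "flake8", "black", "pre-commit"].any (fun t => PySem.Str.isIn t (PySem.Str.lower f))
def psB (f : String) : Bool := ["security.md", "dependabot", "bandit"].any (fun i => PySem.Str.isIn i (PySem.Str.lower f))
def docUpd (seen : List String) (f : String) : List String :=
  ["README", "LICENSE"].foldl (fun s doc => if PySem.Str.isIn doc (PySem.Str.upper f) then PySem.Set.add s doc else s) seen
lemma stepB_eq (st : Bool × Bool × Bool × List String) (f : String) :
    pvStepB st f = (st.1 || pciA f, st.2.1 || pqB f, st.2.2.1 || psB f, docUpd st.2.2.2 f) := by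
  show (⟨_,_,_,_⟩ : Bool × Bool × Bool × List String) = _
  refine congrArg₂ Prod.mk ?_ (congrArg₂ Prod.mk ?_ (congrArg₂ Prod.mk ?_ rfl)) <;>
    [cases h : pciA f; cases h : pqB f; cases h : psB f] <;>
    simp only [pciA, pqB, psB] at h <;> rw [h] <;> simp
lemma foldl_stepB (xs : List String) (c q s : Bool) (seen : List String) :
    xs.foldl pvStepB (c, q, s, seen) =
      (c || xs.any pciA, q || xs.any pqB, s || xs.any psB, xs.foldl docUpd seen) := by
  induction xs generalizing c q s seen with
  | nil => simp
  | cons f xs ih =>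
    rw [List.foldl_cons, stepB_eq, ih]
    simp only [List.any_cons, List.foldl_cons, Bool.or_assoc]
lemma pv_orCollect {S P A B : Prop} : ((S ∨ P ∧ A) ∨ P ∧ B) ↔ (S ∨ P ∧ (A ∨ B)) := by tauto

lemma mem_docUpd (seen : List String) (f d : String) :
    d ∈ docUpd seen f ↔ d ∈ seen ∨
      ((d = "README" ∨ d = "LICENSE") ∧ PySem.Str.isIn d (PySem.Str.upper f) = true) := by
  simp only [docUpd, List.foldl]
  split_ifs with h1 h2 h2
  · simp only [PySem.Set.mem_add]
    constructor
    · rintro ((h | rfl) | rfl)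
      · exact Or.inl h
      · exact Or.inr ⟨Or.inl rfl, h2⟩
      · exact Or.inr ⟨Or.inr rfl, h1⟩
    · rintro (h | ⟨rfl | rfl, h⟩)
      · exact Or.inl (Or.inl h)
      · exact Or.inl (Or.inr rfl)
      · exact Or.inr rfl
  · simp only [PySem.Set.mem_add]
    constructor
    · rintro (h | rfl)
      · exact Or.inl h
      · exact Or.inr ⟨Or.inr rfl, h1⟩
    · rintro (h | ⟨rfl | rfl, h⟩)
      · exact Or.inl h
      · exact absurd h h2
      · exact Or.inr rfl
  · simp only [PySem.Set.mem_add]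
    constructor
    · rintro (h | rfl)
      · exact Or.inl h
      · exact Or.inr ⟨Or.inl rfl, h2⟩
    · rintro (h | ⟨rfl | rfl, h⟩)
      · exact Or.inl h
      · exact Or.inr rfl
      · exact absurd h h1
  · constructor
    · exact Or.inl
    · rintro (h | ⟨rfl | rfl, h⟩)
      · exact h
      · exact absurd h h2
      · exact absurd h h1
lemma mem_foldl_docUpd (xs : List String) (seen : List String) (d : String) :
    d ∈ xs.foldl docUpd seen ↔ d ∈ seen ∨
      ((d = "README" ∨ d = "LICENSE") ∧ ∃ f ∈ xs, PySem.Str.isIn d (PySem.Str.upper f) = true) := by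
  induction xs generalizing seen with
  | nil => simp
  | cons f xs ih =>
    rw [List.foldl_cons, ih, mem_docUpd]
    simp only [List.exists_mem_cons_iff]
    exact pv_orCollect
lemma any_swap {α β : Type} (xs : List α) (ys : List β) (p : α → β → Bool) :
    (xs.any fun a => ys.any fun b => p a b) = ys.any fun b => xs.any fun a => p a b := by
  rw [Bool.eq_iff_iff]; simp only [List.any_eq_true]; tauto
lemma contains_final (xs : List String) (d : String) (hd : d = "README" ∨ d = "LICENSE") :
    PySem.Set.contains (xs.foldl docUpd PySem.Set.empty) d =
      xs.any (fun f => PySem.Str.isIn d (PySem.Str.upper f)) := by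
  rw [Bool.eq_iff_iff, PySem.Set.contains_iff, mem_foldl_docUpd]
  simp only [PySem.Set.empty, List.not_mem_nil, false_or, List.any_eq_true]
  exact and_iff_right hd

lemma foldl_stepB_eta (xs : List String) (c q s : Bool) (seen : List String) :
    xs.foldl pvStepB (c, q, s, seen) =
      (c || xs.any (fun f => pciA f), q || xs.any (fun f => pqB f), s || xs.any (fun f => psB f),
       xs.foldl docUpd seen) :=
  foldl_stepB xs c q s seen

-- ===== VERDICT (by name: the statement is the Claim_ definition above) =====
theorem identify_governance_gaps_spec : Claim_equal_identify_governance_gaps := by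
  intro file_list structure_ _
  unfold Spec_identify_governance_gaps
  have hq : (["pylint", "flake8", "black", "pre-commit"].any fun tool =>
        file_list.any fun f => PySem.Str.isIn tool (PySem.Str.lower f)) =
      file_list.any fun f => pqB f := by
    rw [any_swap]; rfl
  have hs : (["SECURITY.md", "dependabot", "bandit"].any fun ind =>
        file_list.any fun f => PySem.Str.isIn (PySem.Str.lower ind) (PySem.Str.lower f)) =
      file_list.any fun f => psB f := by
    have e1 : PySem.Str.lower "SECURITY.md" = "security.md" := by decide
    have e2 : PySem.Str.lower "dependabot" = "dependabot" := by decide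
    have e3 : PySem.Str.lower "bandit" = "bandit" := by decide
    have h1 : (["SECURITY.md", "dependabot", "bandit"].any fun ind =>
          file_list.any fun f => PySem.Str.isIn (PySem.Str.lower ind) (PySem.Str.lower f)) =
        ["security.md", "dependabot", "bandit"].any fun ind =>
          file_list.any fun f => PySem.Str.isIn ind (PySem.Str.lower f) := by
      simp only [List.any_cons, List.any_nil, e1, e2, e3]
    rw [h1, any_swap]; rfl
  have hdocs : (["README", "LICENSE"].filter fun doc =>
        !(file_list.any fun f => PySem.Str.isIn doc (PySem.Str.upper f))) =
      ["README", "LICENSE"].filter fun doc =>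
        !(PySem.Set.contains (file_list.foldl docUpd PySem.Set.empty) doc) := by
    refine List.filter_congr ?_
    intro x hx
    have hx' : x = "README" ∨ x = "LICENSE" := by simpa using hx
    rw [contains_final file_list x hx']
  simp only [identify_governance_gaps, identify_governance_gaps_alt, foldl_stepB_eta,
    Bool.false_or, pciA, pqB, psB, hq, hs, hdocs]
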